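-- pv_equiv track=rewrite | github.com/irumel/cleaning_order | cleaning.py | find_activate_person_and_minimum
-- ===== SOURCE A (Python) =====
-- def find_activate_person_and_minimum(info, index):
--   active_index = []
--   for ind, i in enumerate(info):
--     if i[5]: active_index.append(ind)
--
--   smaller = [x for x in active_index if x < index]
--   larger = [x for x in active_index if x > index]
--
--   result = []
--
--   if smaller:
--       result.append(max(smaller))
--   if larger:
--       result.append(min(larger))
--
--   minimum = 10000
--   for i in result:
--     if info[i][3] < minimum: minimum = info[i][3]
--
--   return minimum
-- ===== SOURCE B (Python) =====
-- def find_activate_person_and_minimum(info, index):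
--     n = len(info)
--     found = []
--     j = min(index - 1, n - 1)
--     while j >= 0:
--         if info[j][5]:
--             found.append(j)
--             break
--         j -= 1
--     j = max(index + 1, 0)
--     while j < n:
--         if info[j][5]:
--             found.append(j)
--             break
--         j += 1
--     minimum = 10000
--     for i in found:
--         if info[i][3] < minimum:
--             minimum = info[i][3]
--     return minimum
-- ===== Notes on version B (the rewrite author's own statement) =====
-- stated objective: faster
-- what changed: Instead of building the full active-index list and filtering it twice for max/min, B scans outward from index (left loop down, right loop up) and stops at the first active row on each side.
import Mathlib
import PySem

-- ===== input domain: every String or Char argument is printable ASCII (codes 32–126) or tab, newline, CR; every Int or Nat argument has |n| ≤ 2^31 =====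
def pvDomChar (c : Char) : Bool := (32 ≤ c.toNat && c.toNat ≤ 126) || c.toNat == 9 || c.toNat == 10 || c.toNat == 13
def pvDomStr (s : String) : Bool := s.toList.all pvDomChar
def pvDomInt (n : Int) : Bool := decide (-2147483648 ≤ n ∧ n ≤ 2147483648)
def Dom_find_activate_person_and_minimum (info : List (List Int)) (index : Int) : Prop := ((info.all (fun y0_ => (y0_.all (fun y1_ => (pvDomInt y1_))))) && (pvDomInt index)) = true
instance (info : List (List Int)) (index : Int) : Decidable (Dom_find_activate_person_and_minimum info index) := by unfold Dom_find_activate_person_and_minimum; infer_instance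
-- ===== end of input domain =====

-- B replaces A's full passes (collect every active index, filter twice, max/min) by two
-- early-exit scans outward from `index`; the return value is proved equal on Pre_.

-- ===== PORT A =====
def find_activate_person_and_minimum (info : List (List Int)) (index : Int) : Int :=
  let active_index : List Int :=
    (PySem.List.enumerate info 0).foldl
      (fun acc p => if PySem.List.pyGetD p.2 5 0 != 0 then acc ++ [p.1] else acc) []
  let smaller := active_index.filter (fun x => decide (x < index))
  let larger := active_index.filter (fun x => decide (x > index))
  let result : List Int :=
    (match PySem.List.max? smaller (fun y => y) with | some m => [m] | none => []) ++
    (match PySem.List.min? larger (fun y => y) with | some m => [m] | none => [])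
  result.foldl (fun minimum i =>
    if PySem.List.pyGetD (PySem.List.pyGetD info i []) 3 0 < minimum
    then PySem.List.pyGetD (PySem.List.pyGetD info i []) 3 0 else minimum) 10000

-- ===== PORT B =====
-- the truthiness test info[j][5] of B's loops, j a non-negative in-range index
def pvAct (info : List (List Int)) (j : Int) : Bool :=
  PySem.List.pyGetD (PySem.List.pyGetD info j []) 5 0 != 0

-- B's left loop: scan j, j-1, …, 0, stop at the first active row
def pvScanL (info : List (List Int)) : Nat → Option Int
  | 0 => if pvAct info 0 then some 0 else none
  | j+1 => if pvAct info ((j : Int)+1) then some ((j : Int)+1) else pvScanL info j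

-- B's right loop: scan j, j+1, …, n-1, stop at the first active row
def pvScanR (info : List (List Int)) (n : Nat) (j : Nat) : Option Int :=
  if h : j < n then (if pvAct info (j : Int) then some (j : Int) else pvScanR info n (j+1))
  else none
termination_by n - j

def find_activate_person_and_minimum_alt (info : List (List Int)) (index : Int) : Int :=
  let startL : Int := min (index - 1) ((info.length : Int) - 1)
  let left : Option Int := if startL < 0 then none else pvScanL info startL.toNat
  let startR : Int := max (index + 1) 0
  let right : Option Int := pvScanR info info.length startR.toNat
  let found : List Int :=
    (match left with | some m => [m] | none => []) ++
    (match right with | some m => [m] | none => [])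
  found.foldl (fun minimum i =>
    if PySem.List.pyGetD (PySem.List.pyGetD info i []) 3 0 < minimum
    then PySem.List.pyGetD (PySem.List.pyGetD info i []) 3 0 else minimum) 10000

-- ===== PRECONDITION & SPEC =====
-- Pre_ excludes exactly the inputs on which Python A raises IndexError: a row shorter than 6.
def Pre_find_activate_person_and_minimum (info : List (List Int)) (index : Int) : Prop :=
  ∀ row ∈ info, 6 ≤ row.length
instance (info : List (List Int)) (index : Int) : Decidable (Pre_find_activate_person_and_minimum info index) := by unfold Pre_find_activate_person_and_minimum; infer_instance

def pvWitness_find_activate_person_and_minimum : List (List Int) × Int :=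
  ([[0, 0, 0, 7, 0, 1], [0, 0, 0, 3, 0, 0]], 1)

def Spec_find_activate_person_and_minimum (info : List (List Int)) (index : Int) (out : Int) : Prop := out = find_activate_person_and_minimum_alt info index
instance (info : List (List Int)) (index : Int) (out : Int) : Decidable (Spec_find_activate_person_and_minimum info index out) := by unfold Spec_find_activate_person_and_minimum; infer_instance

-- ===== CLAIM (what is proved, stated in full; the proofs are below) =====
def Claim_equal_find_activate_person_and_minimum : Prop := ∀ (info : List (List Int)) (index : Int), Dom_find_activate_person_and_minimum info index → Pre_find_activate_person_and_minimum info index → Spec_find_activate_person_and_minimum info index (find_activate_person_and_minimum info index)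

-- ===== LEMMAS AND PROOFS =====

-- the ascending list [0, 1, …, n-1] as integers
def pvIdxs (n : Nat) : List Int := (List.range n).map (fun k : Nat => (k : Int))

theorem pvIdxs_succ (n : Nat) : pvIdxs (n+1) = pvIdxs n ++ [(n : Int)] := by
  simp [pvIdxs, List.range_succ]

theorem pv_mem_idxs {n : Nat} {x : Int} (h : x ∈ pvIdxs n) : 0 ≤ x ∧ x < (n : Int) := by
  simp only [pvIdxs, List.mem_map] at h
  obtain ⟨j, hj, rfl⟩ := h
  rw [List.mem_range] at hj
  exact ⟨Int.natCast_nonneg j, by exact_mod_cast hj⟩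

-- foldl min stays at the head when the head is minimal
theorem pv_foldl_min (F : List Int) (a : Int) (h : ∀ x ∈ F, a ≤ x) : F.foldl min a = a := by
  induction F with
  | nil => rfl
  | cons x t ih =>
    have hx : min a x = a := min_eq_left (h x (by simp))
    simp only [List.foldl_cons, hx]
    exact ih (fun y hy => h y (by simp [hy]))

theorem pv_foldl_max_le (t : List Int) (x a : Int) (hx : x ≤ a) (h : ∀ y ∈ t, y ≤ a) :
    t.foldl max x ≤ a := by
  induction t generalizing x with
  | nil => exact hx
  | cons y s ih =>
    simp only [List.foldl_cons]
    exact ih (max x y) (max_le hx (h y (by simp))) (fun z hz => h z (by simp [hz]))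

theorem pv_min_head (F : List Int) (a : Int) (h : ∀ x ∈ F, a ≤ x) :
    PySem.List.min? (a :: F) (fun y => y) = some a := by
  rw [PySem.List.min?_id_cons, pv_foldl_min F a h]

theorem pv_max_last (F : List Int) (a : Int) (h : ∀ x ∈ F, x ≤ a) :
    PySem.List.max? (F ++ [a]) (fun y => y) = some a := by
  cases F with
  | nil => simp [PySem.List.max?_id_cons]
  | cons x t =>
    rw [List.cons_append, PySem.List.max?_id_cons, List.foldl_append]
    have hle : t.foldl max x ≤ a :=
      pv_foldl_max_le t x a (h x (by simp)) (fun y hy => h y (by simp [hy]))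
    simp [max_eq_right hle]

-- left scan computes max of the active indices ≤ j
theorem pv_scanL_spec (info : List (List Int)) (j : Nat) :
    pvScanL info j = PySem.List.max? ((pvIdxs (j+1)).filter (pvAct info)) (fun y => y) := by
  induction j with
  | zero =>
    cases h : pvAct info 0 with
    | false => simp [pvScanL, pvIdxs, h, PySem.List.max?]
    | true => simp [pvScanL, pvIdxs, h, PySem.List.max?_id_cons]
  | succ j ih =>
    have hc : ((j+1 : Nat) : Int) = (j : Int) + 1 := by push_cast; ring
    rw [pvIdxs_succ, List.filter_append, hc, List.filter_cons, List.filter_nil]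
    cases h : pvAct info ((j : Int)+1) with
    | false =>
      simp only [pvScanL, h, Bool.false_eq_true, if_false, List.append_nil]
      exact ih
    | true =>
      simp only [pvScanL, h, if_true]
      refine (pv_max_last _ _ ?_).symm
      intro x hx
      have hb := pv_mem_idxs (List.mem_of_mem_filter hx)
      omega

-- right scan computes min of the active indices in [j, n)
theorem pv_scanR_spec (info : List (List Int)) (n : Nat) :
    ∀ k j, n - j ≤ k →
      pvScanR info n j
        = PySem.List.min? (((List.range' j (n - j)).map (fun m : Nat => (m : Int))).filter (pvAct info)) (fun y => y) := by
  intro k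
  induction k with
  | zero =>
    intro j hj
    have hjn : ¬ j < n := by omega
    have h0 : n - j = 0 := by omega
    rw [pvScanR, dif_neg hjn, h0]
    simp [PySem.List.min?]
  | succ k ih =>
    intro j hj
    by_cases hjn : j < n
    · have hd : n - j = (n - (j+1)) + 1 := by omega
      rw [pvScanR, dif_pos hjn, hd, List.range'_succ, List.map_cons, List.filter_cons]
      cases h : pvAct info (j : Int) with
      | true =>
        simp only [h, if_true]
        refine (pv_min_head _ _ ?_).symm
        intro x hx
        have hx' := List.mem_of_mem_filter hx
        rw [List.range'_eq_map_range] at hx'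
        simp only [List.map_map, List.mem_map, List.mem_range] at hx'
        obtain ⟨i, hi, rfl⟩ := hx'
        simp only [Function.comp]
        omega
      | false =>
        simp only [h, Bool.false_eq_true, if_false]
        exact ih (j+1) (by omega)
    · have h0 : n - j = 0 := by omega
      rw [pvScanR, dif_neg hjn, h0]
      simp [PySem.List.min?]

-- the loop appending active indices is a filter
theorem pv_foldl_filter (info : List (List Int)) (l : List Int) (acc : List Int) :
    l.foldl (fun acc j => if pvAct info j then acc ++ [j] else acc) acc
      = acc ++ l.filter (pvAct info) := by
  induction l generalizing acc with
  | nil => simp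
  | cons x t ih =>
    cases h : pvAct info x with
    | true => simp [h, ih, List.filter_cons]
    | false => simp [h, ih, List.filter_cons]

-- A's active_index list is the filter of the index range
theorem pv_active_eq (info : List (List Int)) :
    (PySem.List.enumerate info 0).foldl
      (fun acc p => if PySem.List.pyGetD p.2 5 0 != 0 then acc ++ [p.1] else acc) []
    = (pvIdxs info.length).filter (pvAct info) := by
  rw [PySem.List.enumerate_eq_map_pyRange info ([] : List Int)]
  simp only [PySem.List.len_eq]
  rw [PySem.List.pyRange_zero_natCast, List.foldl_map]
  exact pv_foldl_filter info ((List.range info.length).map (fun k : Nat => (k : Int))) []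

-- smaller = [] when the left start index is negative
theorem pv_smaller_nil (info : List (List Int)) (index : Int)
    (h : min (index - 1) ((info.length : Int) - 1) < 0) :
    (pvIdxs info.length).filter (fun x => decide (x < index) && pvAct info x) = [] := by
  have hcase : index - 1 < 0 ∨ (info.length : Int) - 1 < 0 := by
    rcases min_cases (index - 1) ((info.length : Int) - 1) with ⟨heq, _⟩ | ⟨heq, _⟩ <;>
      rw [heq] at h <;> [exact Or.inl h; exact Or.inr h]
  apply List.filter_eq_nil_iff.mpr
  intro x hx
  have hb := pv_mem_idxs hx
  rcases hcase with h1 | h1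
  · have hd : decide (x < index) = false := by simp; omega
    simp [hd]
  · omega

-- smaller = the active indices in [0, startL] when startL ≥ 0
theorem pv_smaller_pos (info : List (List Int)) (index : Int)
    (h : 0 ≤ min (index - 1) ((info.length : Int) - 1)) :
    (pvIdxs info.length).filter (fun x => decide (x < index) && pvAct info x)
      = (pvIdxs ((min (index - 1) ((info.length : Int) - 1)).toNat + 1)).filter (pvAct info) := by
  set s := (min (index - 1) ((info.length : Int) - 1)).toNat with hs
  have hs1 : (s : Int) = min (index - 1) ((info.length : Int) - 1) := Int.toNat_of_nonneg h
  have hminl : min (index - 1) ((info.length : Int) - 1) ≤ index - 1 := min_le_left _ _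
  have hminr : min (index - 1) ((info.length : Int) - 1) ≤ (info.length : Int) - 1 := min_le_right _ _
  have hsle : s + 1 ≤ info.length := by omega
  have hsplit : List.range info.length
      = List.range (s+1) ++ (List.range (info.length - (s+1))).map ((s+1) + ·) := by
    rw [← List.range_add]; congr 1; omega
  rw [pvIdxs, hsplit, List.map_append, List.filter_append]
  have h1 : ((List.range (s+1)).map (fun k : Nat => (k : Int))).filter
        (fun x => decide (x < index) && pvAct info x)
      = (pvIdxs (s+1)).filter (pvAct info) := by
    apply List.filter_congr
    intro x hx
    have hb := pv_mem_idxs (n := s+1) (x := x) hx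
    have hd : decide (x < index) = true := by simp; omega
    simp [hd]
  have h2 : (((List.range (info.length - (s+1))).map ((s+1) + ·)).map (fun k : Nat => (k : Int))).filter
        (fun x => decide (x < index) && pvAct info x) = [] := by
    rcases min_cases (index - 1) ((info.length : Int) - 1) with ⟨heq, _⟩ | ⟨heq, _⟩
    · apply List.filter_eq_nil_iff.mpr
      intro x hx
      simp only [List.map_map, List.mem_map, List.mem_range, Function.comp] at hx
      obtain ⟨i, hi, rfl⟩ := hx
      intro hc
      rw [Bool.and_eq_true, decide_eq_true_eq] at hc
      exact absurd hc.1 (by push_cast; omega)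
    · have h0 : info.length - (s+1) = 0 := by omega
      simp [h0]
  rw [h1, h2, List.append_nil]

-- larger = the active indices in [startR, n)
theorem pv_larger_eq (info : List (List Int)) (index : Int) :
    (pvIdxs info.length).filter (fun x => decide (x > index) && pvAct info x)
      = ((List.range' (max (index + 1) 0).toNat (info.length - (max (index + 1) 0).toNat)).map
          (fun m : Nat => (m : Int))).filter (pvAct info) := by
  set s := (max (index + 1) 0).toNat with hs
  have hs1 : (s : Int) = max (index + 1) 0 := Int.toNat_of_nonneg (le_max_right _ _)
  have hmax : index + 1 ≤ max (index + 1) 0 := le_max_left _ _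
  by_cases hn : info.length ≤ s
  · have h0 : info.length - s = 0 := by omega
    rw [h0]
    simp only [List.range'_zero, List.map_nil, List.filter_nil]
    apply List.filter_eq_nil_iff.mpr
    intro x hx
    have hb := pv_mem_idxs hx
    have hd : decide (x > index) = false := by simp; omega
    simp [hd]
  · push_neg at hn
    have hsplit : List.range info.length
        = List.range s ++ (List.range (info.length - s)).map (s + ·) := by
      rw [← List.range_add]; congr 1; omega
    rw [pvIdxs, hsplit, List.map_append, List.filter_append]
    have h1 : ((List.range s).map (fun k : Nat => (k : Int))).filter
          (fun x => decide (x > index) && pvAct info x) = [] := by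
      apply List.filter_eq_nil_iff.mpr
      intro x hx
      have hb := pv_mem_idxs (n := s) (x := x) hx
      have hd : decide (x > index) = false := by simp; omega
      simp [hd]
    have h2 : (((List.range (info.length - s)).map (s + ·)).map (fun k : Nat => (k : Int))).filter
          (fun x => decide (x > index) && pvAct info x)
        = ((List.range' s (info.length - s)).map (fun m : Nat => (m : Int))).filter (pvAct info) := by
      rw [List.range'_eq_map_range]
      apply List.filter_congr
      intro x hx
      simp only [List.map_map, List.mem_map, List.mem_range, Function.comp] at hx
      obtain ⟨i, hi, rfl⟩ := hx
      have hd : decide (((s + i : Nat) : Int) > index) = true := by simp; omega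
      rw [hd, Bool.true_and]
    rw [h1, h2, List.nil_append]

-- ===== VERDICT (by name: the statement is the Claim_ definition above) =====
theorem find_activate_person_and_minimum_spec : Claim_equal_find_activate_person_and_minimum := by
  intro info index _ _
  unfold Spec_find_activate_person_and_minimum
  unfold find_activate_person_and_minimum find_activate_person_and_minimum_alt
  simp only [pv_active_eq, List.filter_filter]
  rw [pv_larger_eq, ← pv_scanR_spec info info.length (info.length - (max (index + 1) 0).toNat) _ le_rfl]
  by_cases hL : min (index - 1) ((info.length : Int) - 1) < 0
  · rw [pv_smaller_nil info index hL, if_pos hL]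
    rfl
  · push_neg at hL
    rw [pv_smaller_pos info index hL, ← pv_scanL_spec, if_neg (not_lt.mpr hL)]
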